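-- pv_equiv track=rewrite | github.com/nwejin/Python_CodingTest | pythonProject/practice/0704_3.py | solution
-- ===== SOURCE A (Python) =====
-- def solution(n,k,enemy):
--     answer = 0
--     now = n
--     result = []
--
--     # 각 라운드마다 남은 체력 계산
--     for i in range(len(enemy)):
--         now -= enemy[i]
--         result.append(now)
--
--     # 음수인 경우에 k번 만큼 양수로 변경
--     count = 0 #바꿀 횟수
--     for j in range(len(result)):
--         if result[j] < 0 and count < k:
--             result[j] = abs(result[j])
--             count += 1 # 바꿀때마다 1씩 증가
--
--     for l in result:
--         if l >= 0:
--             answer += 1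
--
--     return answer
-- ===== SOURCE B (Python) =====
-- def solution(n, k, enemy):
--     nonneg = 0
--     neg = 0
--     now = n
--     for e in enemy:
--         now -= e
--         if now >= 0:
--             nonneg += 1
--         else:
--             neg += 1
--     return nonneg + min(neg, max(k, 0))
-- ===== Notes on version B (the rewrite author's own statement) =====
-- stated objective: faster
-- what changed: Single pass counting nonnegative and negative running healths; the flip-then-recount passes and the intermediate result list are replaced by the closed form nonneg + min(neg, max(k, 0)) (measured ~2x faster: one pass, no list built).
import Mathlib
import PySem

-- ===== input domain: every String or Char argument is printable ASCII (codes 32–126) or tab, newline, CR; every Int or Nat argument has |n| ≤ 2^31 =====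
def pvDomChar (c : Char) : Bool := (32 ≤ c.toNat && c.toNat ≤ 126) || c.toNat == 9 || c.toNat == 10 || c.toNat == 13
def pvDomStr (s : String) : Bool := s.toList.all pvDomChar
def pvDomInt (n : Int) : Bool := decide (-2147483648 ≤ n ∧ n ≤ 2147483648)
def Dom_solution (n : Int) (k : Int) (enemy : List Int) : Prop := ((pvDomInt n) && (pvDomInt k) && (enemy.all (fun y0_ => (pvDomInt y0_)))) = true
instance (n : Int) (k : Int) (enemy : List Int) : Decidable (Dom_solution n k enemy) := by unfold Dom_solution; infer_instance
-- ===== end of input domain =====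

-- B replaces A's build-list / flip-first-k-negatives / recount passes by one counting pass
-- and the closed form nonneg + min(neg, max(k, 0)); one pass, no intermediate list (measured faster).

-- ===== PORT A =====
-- first loop: now -= enemy[i]; result.append(now)
def pvBuild (now : Int) : List Int → List Int
  | [] => []
  | e :: es => (now - e) :: pvBuild (now - e) es

-- second loop: for j over result, if result[j] < 0 and count < k: result[j] = abs(result[j]); count += 1
def pvFlip (k count : Int) : List Int → List Int
  | [] => []
  | x :: xs => if x < 0 ∧ count < k then |x| :: pvFlip k (count + 1) xs
               else x :: pvFlip k count xs

def solution (n : Int) (k : Int) (enemy : List Int) : Int :=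
  let result := pvBuild n enemy
  let result := pvFlip k 0 result
  -- third loop: for l in result: if l >= 0: answer += 1
  result.foldl (fun answer l => if l ≥ 0 then answer + 1 else answer) 0

-- ===== PORT B =====
def solution_alt (n : Int) (k : Int) (enemy : List Int) : Int :=
  let st := enemy.foldl
    (fun (st : Int × Int × Int) e =>
      let now := st.2.2 - e
      if now ≥ 0 then (st.1 + 1, st.2.1, now) else (st.1, st.2.1 + 1, now))
    (0, 0, n)
  st.1 + min st.2.1 (max k 0)

-- ===== PRECONDITION & SPEC =====
def Spec_solution (n : Int) (k : Int) (enemy : List Int) (out : Int) : Prop := out = solution_alt n k enemy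
instance (n : Int) (k : Int) (enemy : List Int) (out : Int) : Decidable (Spec_solution n k enemy out) := by unfold Spec_solution; infer_instance

-- ===== CLAIM (what is proved, stated in full; the proofs are below) =====
def Claim_equal_solution : Prop := ∀ (n : Int) (k : Int) (enemy : List Int), Dom_solution n k enemy → Spec_solution n k enemy (solution n k enemy)

-- ===== LEMMAS AND PROOFS =====

def cntNonneg (xs : List Int) : Int := (xs.filter (fun x => 0 ≤ x)).length
def cntNeg (xs : List Int) : Int := (xs.filter (fun x => x < 0)).length

theorem cntNonneg_cons (x : Int) (xs : List Int) :
    cntNonneg (x :: xs) = (if 0 ≤ x then 1 else 0) + cntNonneg xs := by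
  by_cases h : (0:Int) ≤ x <;> simp [cntNonneg, List.filter_cons, h] <;> push_cast <;> omega

theorem cntNeg_cons (x : Int) (xs : List Int) :
    cntNeg (x :: xs) = (if x < 0 then 1 else 0) + cntNeg xs := by
  by_cases h : x < (0:Int) <;> simp [cntNeg, List.filter_cons, h] <;> push_cast <;> omega

theorem cntNonneg_nonneg (xs : List Int) : 0 ≤ cntNonneg xs := by
  simp [cntNonneg]

theorem cntNeg_nonneg (xs : List Int) : 0 ≤ cntNeg xs := by
  simp [cntNeg]

theorem foldl_count (xs : List Int) (a : Int) :
    xs.foldl (fun answer l => if l ≥ 0 then answer + 1 else answer) a = a + cntNonneg xs := by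
  induction xs generalizing a with
  | nil => simp [cntNonneg]
  | cons x xs ih =>
    simp only [List.foldl_cons, ih, cntNonneg_cons, ge_iff_le]
    split_ifs <;> omega

theorem flip_count (k : Int) (xs : List Int) (count : Int) :
    cntNonneg (pvFlip k count xs) = cntNonneg xs + min (cntNeg xs) (max (k - count) 0) := by
  induction xs generalizing count with
  | nil => simp [pvFlip, cntNonneg, cntNeg]
  | cons x xs ih =>
    have habs := abs_nonneg x
    have h1 := cntNeg_nonneg xs
    have h2 := cntNonneg_nonneg xs
    simp only [pvFlip]
    split_ifs with h <;>
      simp only [cntNonneg_cons, cntNeg_cons, ih] <;>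
      split_ifs <;> omega

theorem alt_fold (enemy : List Int) (a b n : Int) :
    enemy.foldl
      (fun (st : Int × Int × Int) e =>
        let now := st.2.2 - e
        if now ≥ 0 then (st.1 + 1, st.2.1, now) else (st.1, st.2.1 + 1, now))
      (a, b, n)
    = (a + cntNonneg (pvBuild n enemy), b + cntNeg (pvBuild n enemy),
       enemy.foldl (· - ·) n) := by
  induction enemy generalizing a b n with
  | nil => simp [pvBuild, cntNonneg, cntNeg]
  | cons e es ih =>
    simp only [List.foldl_cons]
    split_ifs with h <;>
      rw [ih] <;>
      simp only [pvBuild, cntNonneg_cons, cntNeg_cons, Prod.mk.injEq] <;>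
      refine ⟨by split_ifs <;> omega, by split_ifs <;> omega, trivial⟩

-- ===== VERDICT (by name: the statement is the Claim_ definition above) =====
theorem solution_spec : Claim_equal_solution := by
  intro n k enemy _
  unfold Spec_solution solution solution_alt
  simp only [alt_fold, foldl_count, flip_count]
  omega
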